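-- pv_equiv track=rewrite | github.com/jinukim-ml/coding-test-prep | Leetcode/Arrays and hashing/2028. Find Missing Observations.py | missingRolls
-- ===== SOURCE A (Python) =====
-- def missingRolls(rolls: list[int], mean: int, n: int) -> list[int]:
--     s = sum(rolls) # O(m)
--     target = mean * (n + len(rolls)) - s
--
--     if n <= target <= 6 * n:
--         ans = []
--         remaining = n
--         for _ in range(n): # O(n)
--             for x in range(1, 7):
--                 if remaining - 1 <= target - x <= (remaining - 1) * 6:
--                     ans.append(x)
--                     target -= x
--                     remaining -= 1
--                     break
--         return ans
--     else:
--         return []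
-- ===== SOURCE B (Python) =====
-- def missingRolls(rolls: list[int], mean: int, n: int) -> list[int]:
--     target = mean * (n + len(rolls)) - sum(rolls)
--     if not (n <= target <= 6 * n):
--         return []
--     k, r = divmod(target - n, 5)
--     return [1] * (n - k - (1 if r else 0)) + ([1 + r] if r else []) + [6] * k
-- ===== Notes on version B (the rewrite author's own statement) =====
-- stated objective: simpler
-- what changed: Replaces A's per-position greedy loop (with a 1..6 inner scan) by a closed-form divmod construction of the answer as [1]*p + optional transition element + [6]*k.
import Mathlib
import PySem

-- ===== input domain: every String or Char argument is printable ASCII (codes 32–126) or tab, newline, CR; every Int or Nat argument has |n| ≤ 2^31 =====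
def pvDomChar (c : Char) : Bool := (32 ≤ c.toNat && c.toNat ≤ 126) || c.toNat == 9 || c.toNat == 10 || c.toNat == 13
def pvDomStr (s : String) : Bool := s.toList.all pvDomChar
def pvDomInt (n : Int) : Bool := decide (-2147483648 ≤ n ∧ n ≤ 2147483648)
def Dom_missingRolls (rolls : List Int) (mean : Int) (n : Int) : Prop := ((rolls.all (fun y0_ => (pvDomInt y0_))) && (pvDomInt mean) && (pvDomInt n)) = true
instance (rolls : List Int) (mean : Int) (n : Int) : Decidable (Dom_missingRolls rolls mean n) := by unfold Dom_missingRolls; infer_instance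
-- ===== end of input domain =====

-- B replaces A's per-position greedy loop (inner 1..6 scan) by a closed-form divmod construction; same exact output.

-- ===== PORT A =====
-- inner `for x in range(1, 7): … break` of A: scan xs, first x passing the test is appended and consumed
def missingRollsInner (ans : List Int) (target remaining : Int) : List Int → List Int × Int × Int
  | [] => (ans, target, remaining)
  | x :: xs =>
    if remaining - 1 ≤ target - x ∧ target - x ≤ (remaining - 1) * 6 then
      (ans ++ [x], target - x, remaining - 1)
    else missingRollsInner ans target remaining xs

def missingRolls (rolls : List Int) (mean : Int) (n : Int) : List Int :=
  let s := rolls.sum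
  let target := mean * (n + (rolls.length : Int)) - s
  if n ≤ target ∧ target ≤ 6 * n then
    let st := (PySem.List.pyRange 0 n 1).foldl
      (fun (st : List Int × Int × Int) _ =>
        missingRollsInner st.1 st.2.1 st.2.2 (PySem.List.pyRange 1 7 1))
      ([], target, n)
    st.1
  else []

-- ===== PORT B =====
def missingRolls_alt (rolls : List Int) (mean : Int) (n : Int) : List Int :=
  let target := mean * (n + (rolls.length : Int)) - rolls.sum
  if n ≤ target ∧ target ≤ 6 * n then
    let k := PySem.Int.floordiv (target - n) 5
    let r := PySem.Int.mod (target - n) 5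
    List.replicate (n - k - (if r ≠ 0 then 1 else 0)).toNat 1 ++
      (if r ≠ 0 then [1 + r] else []) ++ List.replicate k.toNat 6
  else []

-- ===== PRECONDITION & SPEC =====
def Spec_missingRolls (rolls : List Int) (mean : Int) (n : Int) (out : List Int) : Prop := out = missingRolls_alt rolls mean n
instance (rolls : List Int) (mean : Int) (n : Int) (out : List Int) : Decidable (Spec_missingRolls rolls mean n out) := by unfold Spec_missingRolls; infer_instance

-- ===== CLAIM (what is proved, stated in full; the proofs are below) =====
def Claim_equal_missingRolls : Prop := ∀ (rolls : List Int) (mean : Int) (n : Int), Dom_missingRolls rolls mean n → Spec_missingRolls rolls mean n (missingRolls rolls mean n)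

-- ===== LEMMAS AND PROOFS =====

-- closed form of B's body, parameterised by the number of dice (as a Nat) and the target
def pvBody (m : Nat) (t : Int) : List Int :=
  let k := PySem.Int.floordiv (t - (m : Int)) 5
  let r := PySem.Int.mod (t - (m : Int)) 5
  List.replicate ((m : Int) - k - (if r ≠ 0 then 1 else 0)).toNat 1 ++
    (if r ≠ 0 then [1 + r] else []) ++ List.replicate k.toNat 6

def pvStep (st : List Int × Int × Int) : List Int × Int × Int :=
  missingRollsInner st.1 st.2.1 st.2.2 (PySem.List.pyRange 1 7 1)

lemma pvFoldl_const {α β : Type} (f : α → α) :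
    ∀ (l : List β) (init : α), l.foldl (fun st _ => f st) init = f^[l.length] init := by
  intro l
  induction l with
  | nil => intro init; rfl
  | cons x xs ih =>
    intro init
    simp [List.foldl, ih, Function.iterate_succ_apply]

-- one pass of the inner scan picks x = max 1 (t - 6*(rem-1)) under the loop invariant
lemma pvInner_eq (acc : List Int) (t rem : Int) (h0 : 1 ≤ rem) (h1 : rem ≤ t) (h2 : t ≤ 6 * rem) :
    missingRollsInner acc t rem (PySem.List.pyRange 1 7 1) =
      (acc ++ [max 1 (t - 6 * (rem - 1))], t - max 1 (t - 6 * (rem - 1)), rem - 1) := by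
  have hr : PySem.List.pyRange 1 7 1 = [1, 2, 3, 4, 5, 6] := by decide
  rw [hr]
  simp only [missingRollsInner]
  split_ifs with c1 c2 c3 c4 c5 c6 <;>
    refine Prod.ext ?_ (Prod.ext ?_ ?_) <;> simp <;> omega

-- the crux: one greedy step followed by the closed form for m dice equals the closed form for m+1 dice
lemma pvBody_step (m : Nat) (t : Int) (h1 : (m : Int) + 1 ≤ t) (h2 : t ≤ 6 * ((m : Int) + 1)) :
    (max 1 (t - 6 * (m : Int))) :: pvBody m (t - max 1 (t - 6 * (m : Int))) = pvBody (m + 1) t := by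
  have h5 : (0 : Int) < 5 := by norm_num
  set x := max 1 (t - 6 * (m : Int)) with hx
  have hx1 : 1 ≤ x := le_max_left _ _
  unfold pvBody
  rw [PySem.Int.floordiv_eq_ediv_of_pos h5, PySem.Int.floordiv_eq_ediv_of_pos h5,
      PySem.Int.mod_eq_emod_of_pos h5, PySem.Int.mod_eq_emod_of_pos h5]
  set e := t - ((m : Int) + 1) with he
  have hex : t - x - (m : Int) = e - (x - 1) := by omega
  rw [hex]
  push_cast
  have hdm : e = 5 * (e / 5) + e % 5 ∧ 0 ≤ e % 5 ∧ e % 5 < 5 := by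
    omega
  by_cases hc : t ≤ 6 * (m : Int) + 1
  · -- x = 1 : the quotient/remainder are unchanged, one more leading 1
    have hx1' : x = 1 := by omega
    rw [hx1']
    simp only [sub_self, sub_zero]
    set k := e / 5
    set r := e % 5
    have hkm : k + (if r ≠ 0 then (1:Int) else 0) ≤ (m : Int) := by
      split_ifs with hr0 <;> omega
    by_cases hr0 : r = 0
    · simp only [hr0, ne_eq, not_true_eq_false, ite_false]
      have hkm' : k ≤ (m : Int) := by simpa [hr0] using hkm
      rw [show ((m:Int) + 1 - k - 0).toNat = ((m:Int) - k - 0).toNat + 1 by omega, List.replicate_succ]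
      simp
    · simp only [ne_eq, hr0, not_false_eq_true, ite_true]
      have hkm' : k + 1 ≤ (m : Int) := by simpa [hr0] using hkm
      rw [show ((m:Int) + 1 - k - 1).toNat = ((m:Int) - k - 1).toNat + 1 by omega, List.replicate_succ]
      simp
  · -- x = t - 6m ≥ 2 : the new remainder is 0 and x becomes the transition value
    have hx2 : x = t - 6 * (m : Int) := by omega
    have he1 : 5 * (m : Int) < e := by omega
    have he2 : e ≤ 5 * ((m : Int) + 1) := by omega
    have hnew : e - (x - 1) = 5 * (m : Int) := by omega
    rw [hnew]
    have hq : (5 * (m : Int)) / 5 = (m : Int) := by omega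
    have hr' : (5 * (m : Int)) % 5 = 0 := by omega
    rw [hq, hr']
    have h00 : ¬((0:Int) ≠ 0) := by simp
    rw [if_neg h00, if_neg h00]
    have hmt : ((m : Int) - (m : Int) - 0).toNat = 0 := by omega
    rw [hmt]
    simp only [List.replicate_zero, List.nil_append]
    by_cases hr0 : e % 5 = 0
    · -- e = 5(m+1): all sixes, x = 6
      have hk : e / 5 = (m : Int) + 1 := by omega
      have hx6 : x = 6 := by omega
      rw [hk, hr0, hx6]
      rw [if_neg h00, if_neg h00]
      have : (((m : Int) + 1) - ((m : Int) + 1) - 0).toNat = 0 := by omega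
      rw [this]
      have hks : ((m : Int) + 1).toNat = (m : Int).toNat + 1 := by omega
      rw [hks, List.replicate_succ]
      rfl
    · -- 0 < r < 5 : transition element 1 + r, then m sixes
      have hk : e / 5 = (m : Int) := by omega
      have hxr : x = 1 + e % 5 := by omega
      rw [hk, hxr]
      rw [if_pos hr0, if_pos hr0]
      have : (((m : Int) + 1) - (m : Int) - 1).toNat = 0 := by omega
      rw [this]
      rfl

-- the outer loop, iterated m times from target t with remaining = m, appends exactly pvBody m t
lemma pvKey (m : Nat) : ∀ (acc : List Int) (t : Int), (m : Int) ≤ t → t ≤ 6 * (m : Int) →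
    pvStep^[m] (acc, t, (m : Int)) = (acc ++ pvBody m t, 0, 0) := by
  induction m with
  | zero =>
    intro acc t h1 h2
    have ht : t = 0 := by omega
    subst ht
    have hb : pvBody 0 0 = [] := by decide
    simp [hb]
  | succ m ih =>
    intro acc t h1 h2
    push_cast at h1 h2
    rw [Function.iterate_succ_apply,
        show ((m + 1 : Nat) : Int) = (m : Int) + 1 from by simp]
    have hstep : pvStep (acc, t, ((m : Int) + 1)) =
        (acc ++ [max 1 (t - 6 * (m : Int))], t - max 1 (t - 6 * (m : Int)), (m : Int)) := by
      have := pvInner_eq acc t ((m : Int) + 1) (by omega) (by omega) (by omega)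
      simpa [pvStep] using this
    rw [show ((m : Nat) + 1 : Int) = (m : Int) + 1 by push_cast; ring] at hstep
    rw [hstep]
    have hx1 : 1 ≤ max 1 (t - 6 * (m : Int)) := le_max_left _ _
    have hx2 : max 1 (t - 6 * (m : Int)) ≤ t - (m : Int) := by omega
    rw [ih (acc ++ [max 1 (t - 6 * (m : Int))]) (t - max 1 (t - 6 * (m : Int))) (by omega) (by omega)]
    rw [List.append_assoc]
    congr 2
    have := pvBody_step m t (by omega) (by omega)
    simpa using this

theorem pv_main (rolls : List Int) (mean : Int) (n : Int) :
    missingRolls rolls mean n = missingRolls_alt rolls mean n := by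
  unfold missingRolls missingRolls_alt
  set t := mean * (n + (rolls.length : Int)) - rolls.sum with ht
  by_cases hg : n ≤ t ∧ t ≤ 6 * n
  · rw [if_pos hg, if_pos hg]
    have hn0 : 0 ≤ n := by omega
    have hfold : (PySem.List.pyRange 0 n 1).foldl
        (fun (st : List Int × Int × Int) _ =>
          missingRollsInner st.1 st.2.1 st.2.2 (PySem.List.pyRange 1 7 1))
        ([], t, n) = pvStep^[(PySem.List.pyRange 0 n 1).length] ([], t, n) :=
      pvFoldl_const pvStep (PySem.List.pyRange 0 n 1) ([], t, n)
    rw [hfold, PySem.List.length_pyRange_one]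
    have hcast : ((n - 0).toNat : Int) = n := by omega
    have := pvKey (n - 0).toNat [] t (by omega) (by omega)
    rw [hcast] at this
    rw [this]
    simp only [List.nil_append]
    unfold pvBody
    rw [hcast]
  · rw [if_neg hg, if_neg hg]

-- ===== VERDICT (by name: the statement is the Claim_ definition above) =====
theorem missingRolls_spec : Claim_equal_missingRolls := by
  intro rolls mean n _
  unfold Spec_missingRolls
  exact pv_main rolls mean n
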